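-- pv_equiv track=rewrite | github.com/pypi-data/pypi-mirror-389 | packages/lexorank4py/lexorank4py-0.1.0.tar.gz/lexorank4py-0.1.0/lexorank/__init__.py | initialize_lexorank
-- ===== SOURCE A (Python) =====
-- BASE36 = "0123456789abcdefghijklmnopqrstuvwxyz"
--
-- def int_to_rank_with_length(value: int, length: int) -> str:
--     """
--     eg:
--     - int_to_rank_with_length(10, 2) -> "0a"
--     - int_to_rank_with_length(35, 2) -> "0z"
--     - int_to_rank_with_length(36, 2) -> "10"
--     """
--     if value < 0:
--         raise ValueError("Value must be non-negative")
--
--     if value == 0: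
--         result = "0"
--     else:
--         digits = []
--         temp = value
--         while temp > 0:
--             temp, rem = divmod(temp, 36)
--             digits.append(BASE36[rem])
--         result = "".join(reversed(digits))
--     # fill 0 at the left till the length is reached
--     if len(result) < length:
--         result = "0" * (length - len(result)) + result
--
--     return result
--
-- def initialize_lexorank(num: int) -> list[str]:
--
--     if num <= 0:
--         return []
--
--     if num < 35:
--         rank_length = 1
--         max_value = 35
--     else:
--         rank_length = 2
--         max_value = 36 ** 2 - 1
--
--     step = max_value // (num + 1)
--
--     result = []
--     for i in range(1, num + 1):
--         value = i * step
--         result.append(int_to_rank_with_length(value, rank_length))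
--
--     return result
-- ===== SOURCE B (Python) =====
-- BASE36 = "0123456789abcdefghijklmnopqrstuvwxyz"
--
--
-- def initialize_lexorank(num: int) -> list[str]:
--     if num <= 0:
--         return []
--     if num < 35:
--         width, max_value = 1, 35
--     else:
--         width, max_value = 2, 36 ** 2 - 1
--     step = max_value // (num + 1)
--     if width == 1:
--         return [BASE36[i * step] for i in range(1, num + 1)]
--     return [BASE36[(i * step) // 36] + BASE36[(i * step) % 36] for i in range(1, num + 1)]
-- ===== Notes on version B (the rewrite author's own statement) =====
-- stated objective: simpler
-- what changed: Removes the general int_to_rank_with_length helper (divmod while-loop, reversal, zero-padding) and instead extracts the fixed-width base36 digits directly (one index for width 1, quotient+remainder for width 2) in a comprehension, with the width branch lifted out of the loop.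
import Mathlib
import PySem

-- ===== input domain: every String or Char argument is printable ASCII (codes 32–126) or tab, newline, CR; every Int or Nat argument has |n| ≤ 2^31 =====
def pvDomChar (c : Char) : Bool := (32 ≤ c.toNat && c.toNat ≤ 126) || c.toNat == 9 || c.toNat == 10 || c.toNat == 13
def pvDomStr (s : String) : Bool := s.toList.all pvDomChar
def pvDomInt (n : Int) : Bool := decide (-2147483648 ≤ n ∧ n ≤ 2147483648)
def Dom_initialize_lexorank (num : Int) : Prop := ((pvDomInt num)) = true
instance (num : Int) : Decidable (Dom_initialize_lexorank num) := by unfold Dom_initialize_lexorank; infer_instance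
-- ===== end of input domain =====

-- B drops A's general int_to_rank_with_length helper and extracts the fixed-width base36 digits
-- directly (simpler decomposition; same O(num) cost).

-- ===== PORT A =====
-- BASE36 = "0123456789abcdefghijklmnopqrstuvwxyz" (strings are ported as their List Char code points)
def pvBASE36 : List Char := "0123456789abcdefghijklmnopqrstuvwxyz".toList

-- BASE36[i] as the 1-character string it yields; every call site has 0 ≤ i < 36, so getD [] is exact
def pvBase36Get (i : Int) : List Char :=
  match PySem.List.pyGet? pvBASE36 i with
  | some c => [c]
  | none => []

-- the 'while temp > 0: temp, rem = divmod(temp, 36); digits.append(BASE36[rem])' loop of A.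
-- fuel only makes the recursion structural; temp strictly decreases while positive, so
-- fuel = value.toNat at the call site never runs out and the loop is exact
def pvDigitsLoop : Nat → Int → List (List Char) → List (List Char)
  | 0, _, digits => digits
  | fuel + 1, temp, digits =>
    if 0 < temp then
      pvDigitsLoop fuel (PySem.Int.floordiv temp 36)
        (digits ++ [pvBase36Get (PySem.Int.mod temp 36)])
    else digits

-- A's helper; on value < 0 Python raises ValueError — unreachable from initialize_lexorank
-- (there value = i * step ≥ 0), so [] stands in for the raise
def int_to_rank_with_length (value : Int) (length : Int) : List Char :=
  if value < 0 then []
  else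
    let result : List Char :=
      if value = 0 then ['0']
      else ((pvDigitsLoop value.toNat value []).reverse).flatten  -- "".join(reversed(digits))
    if (result.length : Int) < length then
      List.replicate (length - (result.length : Int)).toNat '0' ++ result  -- "0" * (length - len(result)) + result
    else result

def initialize_lexorank (num : Int) : List String :=
  if num ≤ 0 then []
  else
    let rl_mv : Int × Int := if num < 35 then (1, 35) else (2, 36 ^ 2 - 1)
    let step := PySem.Int.floordiv rl_mv.2 (num + 1)
    (PySem.List.pyRange 1 (num + 1) 1).foldl
      (fun acc i => acc ++ [String.ofList (int_to_rank_with_length (i * step) rl_mv.1)]) []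

-- ===== PORT B =====
def initialize_lexorank_alt (num : Int) : List String :=
  if num ≤ 0 then []
  else
    let wm : Int × Int := if num < 35 then (1, 35) else (2, 36 ^ 2 - 1)
    let step := PySem.Int.floordiv wm.2 (num + 1)
    if wm.1 = 1 then
      (PySem.List.pyRange 1 (num + 1) 1).map (fun i => String.ofList (pvBase36Get (i * step)))
    else
      (PySem.List.pyRange 1 (num + 1) 1).map (fun i =>
        String.ofList (pvBase36Get (PySem.Int.floordiv (i * step) 36) ++
                       pvBase36Get (PySem.Int.mod (i * step) 36)))

-- ===== PRECONDITION & SPEC =====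
def Spec_initialize_lexorank (num : Int) (out : List String) : Prop := out = initialize_lexorank_alt num
instance (num : Int) (out : List String) : Decidable (Spec_initialize_lexorank num out) := by unfold Spec_initialize_lexorank; infer_instance

-- ===== CLAIM (what is proved, stated in full; the proofs are below) =====
def Claim_equal_initialize_lexorank : Prop := ∀ (num : Int), Dom_initialize_lexorank num → Spec_initialize_lexorank num (initialize_lexorank num)

-- ===== LEMMAS AND PROOFS =====

-- width 1: A's helper on 0 ≤ v < 35 is exactly the single digit BASE36[v]
lemma itr_one (v : Int) (h0 : 0 ≤ v) (h35 : v < 35) :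
    int_to_rank_with_length v 1 = pvBase36Get v := by
  interval_cases v <;> decide

-- width 2 on Nat, by exhaustive evaluation
set_option maxRecDepth 100000 in
lemma itr_two_nat : ∀ n : Nat, n < 1296 →
    int_to_rank_with_length (n : Int) 2 =
      pvBase36Get (PySem.Int.floordiv (n : Int) 36) ++ pvBase36Get (PySem.Int.mod (n : Int) 36) := by
  decide

-- width 2: A's helper on 0 ≤ v < 1296 is exactly the two fixed-width digits
lemma itr_two (v : Int) (h0 : 0 ≤ v) (h : v < 1296) :
    int_to_rank_with_length v 2 =
      pvBase36Get (PySem.Int.floordiv v 36) ++ pvBase36Get (PySem.Int.mod v 36) := by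
  obtain ⟨n, rfl⟩ := Int.eq_ofNat_of_zero_le h0
  exact itr_two_nat n (by exact_mod_cast h)

-- bounds for the width-1 branch: 1 ≤ num < 35 keeps every value i*step in [0, 35)
lemma bounds_one (num i : Int) (h1 : 1 ≤ num) (h2 : num < 35) (hi : 1 ≤ i) (hi2 : i < num + 1) :
    0 ≤ i * PySem.Int.floordiv 35 (num + 1) ∧ i * PySem.Int.floordiv 35 (num + 1) < 35 := by
  rw [PySem.Int.floordiv_eq_ediv_of_pos (by omega : (0:Int) < num + 1)]
  have hq1 : 1 ≤ 35 / (num + 1) := by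
    rw [Int.le_ediv_iff_mul_le (by omega : (0:Int) < num + 1)]; omega
  have hmul : (num + 1) * (35 / (num + 1)) + 35 % (num + 1) = 35 :=
    Int.mul_ediv_add_emod 35 (num + 1)
  have hr : 0 ≤ 35 % (num + 1) := Int.emod_nonneg 35 (by omega)
  set q := 35 / (num + 1) with hqdef
  constructor
  · positivity
  · have h3 : i * q ≤ num * q := mul_le_mul_of_nonneg_right (by omega) (by omega)
    nlinarith [h3, hmul, hr, hq1]

-- bounds for the width-2 branch: num ≥ 35 keeps every value i*step in [0, 1296)
lemma bounds_two (num i : Int) (h1 : 35 ≤ num) (hi : 1 ≤ i) (hi2 : i < num + 1) :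
    0 ≤ i * PySem.Int.floordiv 1295 (num + 1) ∧ i * PySem.Int.floordiv 1295 (num + 1) < 1296 := by
  rw [PySem.Int.floordiv_eq_ediv_of_pos (by omega : (0:Int) < num + 1)]
  have hq0 : 0 ≤ 1295 / (num + 1) := Int.ediv_nonneg (by omega) (by omega)
  have hmul : (num + 1) * (1295 / (num + 1)) + 1295 % (num + 1) = 1295 :=
    Int.mul_ediv_add_emod 1295 (num + 1)
  have hr : 0 ≤ 1295 % (num + 1) := Int.emod_nonneg 1295 (by omega)
  set q := 1295 / (num + 1) with hqdef
  constructor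
  · positivity
  · have h3 : i * q ≤ num * q := mul_le_mul_of_nonneg_right (by omega) hq0
    nlinarith [h3, hmul, hr, hq0]

-- ===== VERDICT (by name: the statement is the Claim_ definition above) =====
theorem initialize_lexorank_spec : Claim_equal_initialize_lexorank := by
  intro num _
  unfold Spec_initialize_lexorank initialize_lexorank initialize_lexorank_alt
  by_cases hle : num ≤ 0
  · simp [hle]
  · simp only [hle, if_false]
    by_cases hlt : num < 35
    · simp only [hlt, if_true]
      rw [PySem.List.foldl_append_singleton_eq_map]
      simp only [List.nil_append]
      apply List.map_congr_left
      intro i hi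
      rw [PySem.List.mem_pyRange_one] at hi
      have hb := bounds_one num i (by omega) hlt hi.1 hi.2
      rw [itr_one _ hb.1 hb.2]
    · simp only [hlt, if_false]
      rw [PySem.List.foldl_append_singleton_eq_map]
      have h2 : ((2:Int), (36:Int) ^ 2 - 1).1 ≠ 1 := by norm_num
      simp only [List.nil_append, if_neg h2,
        show ((36:Int) ^ 2 - 1) = 1295 from by norm_num]
      apply List.map_congr_left
      intro i hi
      rw [PySem.List.mem_pyRange_one] at hi
      have hb := bounds_two num i (by omega) hi.1 hi.2
      rw [itr_two _ hb.1 hb.2]
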